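-- pv_equiv track=rewrite | github.com/alumnos-ingcom/C2-TP6-grupo-7 | cesar.py | rotador_indices
-- ===== SOURCE A (Python) =====
-- def rotador_indices(lista,indice_inicial,numero_rotaciones, sentido_inverso=False):
--     """ dada una lista y el indice inicial dentro de la lista devuelve el indice que le
--     corresponde despues de rotarlo una cierta cantidad de veces"""
--
--     if sentido_inverso == False:
--         lista_nueva = lista.copy()
--         while (indice_inicial + numero_rotaciones) > (len(lista_nueva) - 1):
--             lista_nueva.extend(lista)
--         return lista.index(lista_nueva[indice_inicial + numero_rotaciones])
--
--     if sentido_inverso == True: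
--         lista_nueva = lista.copy()
--         lista_nueva = list(reversed(lista_nueva))
--         nuevo_indice = ((len(lista)-1) - indice_inicial)
--         while nuevo_indice + numero_rotaciones > (len(lista_nueva)-1):
--             lista_nueva.extend(list(reversed(lista)))
--         return lista.index(lista_nueva[nuevo_indice + numero_rotaciones])
-- ===== SOURCE B (Python) =====
-- def rotador_indices(lista, indice_inicial, numero_rotaciones, sentido_inverso=False):
--     """Closed-form: reduce the offset modulo len(lista) and do one lookup,
--     instead of repeatedly extending a copy of the list."""
--     if sentido_inverso:
--         offset = indice_inicial - numero_rotaciones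
--     else:
--         offset = indice_inicial + numero_rotaciones
--     return lista.index(lista[offset % len(lista)])
-- ===== Notes on version B (the rewrite author's own statement) =====
-- stated objective: faster
-- what changed: Replaces A's while-loop that repeatedly extends a copy of the list until the raw offset fits (O(indice+rotaciones) time and memory) by reducing the offset modulo len(lista) once and doing a single lookup.
import Mathlib
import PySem

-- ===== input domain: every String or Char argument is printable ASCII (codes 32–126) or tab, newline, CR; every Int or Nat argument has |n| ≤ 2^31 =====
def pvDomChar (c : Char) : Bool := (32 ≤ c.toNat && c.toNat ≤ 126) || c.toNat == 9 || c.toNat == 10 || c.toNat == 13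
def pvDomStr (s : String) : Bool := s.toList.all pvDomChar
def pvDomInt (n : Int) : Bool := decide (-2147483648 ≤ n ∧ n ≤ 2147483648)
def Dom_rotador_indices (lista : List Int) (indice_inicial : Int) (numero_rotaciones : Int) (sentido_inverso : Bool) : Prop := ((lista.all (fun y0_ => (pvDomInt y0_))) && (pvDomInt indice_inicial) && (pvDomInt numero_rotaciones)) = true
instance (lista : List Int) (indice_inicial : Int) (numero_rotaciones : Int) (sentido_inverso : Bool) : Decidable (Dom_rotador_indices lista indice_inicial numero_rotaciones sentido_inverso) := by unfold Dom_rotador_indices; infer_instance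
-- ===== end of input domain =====

-- B replaces A's repeated list-extension loop by a single modular reduction of the offset (asymptotically faster).

-- ===== PORT A =====
-- A's while loop: keep extending `nueva` with `base` while the target index is past the end.
-- The accumulated list is carried REVERSED so that each `extend` is a cheap prepend (the list
-- value is the same; pvExtendLoop_eq_naive below proves it equal to the direct recursion).
-- The nonemptiness guard only makes the recursion total: on [] Python's loop diverges (outside Pre_).
-- `n` is Python's O(1) len(lista_nueva), carried as a counter.
def pvExtendLoopRev (revBase : List Int) (t : Int) (revNueva : List Int) (n : Nat) : List Int :=
  if h : revBase ≠ [] ∧ t > (n : Int) - 1 then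
    pvExtendLoopRev revBase t (revBase ++ revNueva) (n + revBase.length)
  else revNueva
termination_by (t + 1 - n).toNat
decreasing_by
  have h1 : 0 < revBase.length := List.length_pos_iff.mpr h.1
  omega

def pvExtendLoop (base : List Int) (t : Int) (nueva : List Int) : List Int :=
  (pvExtendLoopRev base.reverse t nueva.reverse nueva.length).reverse

def rotador_indices (lista : List Int) (indice_inicial : Int) (numero_rotaciones : Int) (sentido_inverso : Bool) : Int :=
  if sentido_inverso = false then
    let lista_nueva := pvExtendLoop lista (indice_inicial + numero_rotaciones) lista
    match PySem.List.pyGet? lista_nueva (indice_inicial + numero_rotaciones) with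
    | some v =>
      match PySem.List.index? lista v with
      | some k => (k : Int)
      | none => 0      -- unreachable: the element comes from copies of lista (Python: ValueError)
    | none => 0        -- Python: IndexError, excluded by Pre_
  else
    let nuevo_indice := ((lista.length : Int) - 1) - indice_inicial
    let lista_nueva := pvExtendLoop lista.reverse (nuevo_indice + numero_rotaciones) lista.reverse
    match PySem.List.pyGet? lista_nueva (nuevo_indice + numero_rotaciones) with
    | some v =>
      match PySem.List.index? lista v with
      | some k => (k : Int)
      | none => 0      -- unreachable (Python: ValueError)
    | none => 0        -- Python: IndexError, excluded by Pre_

-- ===== PORT B =====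
def rotador_indices_alt (lista : List Int) (indice_inicial : Int) (numero_rotaciones : Int) (sentido_inverso : Bool) : Int :=
  let offset := if sentido_inverso then indice_inicial - numero_rotaciones
                else indice_inicial + numero_rotaciones
  match PySem.List.pyGet? lista (PySem.Int.mod offset (lista.length : Int)) with
  | some v =>
    match PySem.List.index? lista v with
    | some k => (k : Int)
    | none => 0        -- unreachable: the element is taken from lista itself
  | none => 0          -- only on lista = [] (Python: ZeroDivisionError), excluded by Pre_

-- ===== PRECONDITION & SPEC =====
-- Pre_ excludes exactly where A does not return: lista = [] (A's while loop diverges) and an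
-- effective offset below -len(lista) (A raises IndexError on the negative index).
def Pre_rotador_indices (lista : List Int) (indice_inicial : Int) (numero_rotaciones : Int) (sentido_inverso : Bool) : Prop :=
  lista ≠ [] ∧
    (if sentido_inverso then
        -(lista.length : Int) ≤ (((lista.length : Int) - 1) - indice_inicial) + numero_rotaciones
     else
        -(lista.length : Int) ≤ indice_inicial + numero_rotaciones)
instance (lista : List Int) (indice_inicial : Int) (numero_rotaciones : Int) (sentido_inverso : Bool) : Decidable (Pre_rotador_indices lista indice_inicial numero_rotaciones sentido_inverso) := by unfold Pre_rotador_indices; infer_instance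

def pvWitness_rotador_indices : List Int × Int × Int × Bool := ([1, 2, 3], 1, 2, false)

def Spec_rotador_indices (lista : List Int) (indice_inicial : Int) (numero_rotaciones : Int) (sentido_inverso : Bool) (out : Int) : Prop := out = rotador_indices_alt lista indice_inicial numero_rotaciones sentido_inverso
instance (lista : List Int) (indice_inicial : Int) (numero_rotaciones : Int) (sentido_inverso : Bool) (out : Int) : Decidable (Spec_rotador_indices lista indice_inicial numero_rotaciones sentido_inverso out) := by unfold Spec_rotador_indices; infer_instance

-- ===== CLAIM (what is proved, stated in full; the proofs are below) =====
def Claim_equal_rotador_indices : Prop := ∀ (lista : List Int) (indice_inicial : Int) (numero_rotaciones : Int) (sentido_inverso : Bool), Dom_rotador_indices lista indice_inicial numero_rotaciones sentido_inverso → Pre_rotador_indices lista indice_inicial numero_rotaciones sentido_inverso → Spec_rotador_indices lista indice_inicial numero_rotaciones sentido_inverso (rotador_indices lista indice_inicial numero_rotaciones sentido_inverso)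
-- ===== LEMMAS AND PROOFS =====

-- The direct (quadratic) form of A's loop, used only in the proofs.
def pvExtendLoopNaive (base : List Int) (t : Int) (nueva : List Int) : List Int :=
  if h : base ≠ [] ∧ t > (nueva.length : Int) - 1 then
    pvExtendLoopNaive base t (nueva ++ base)
  else nueva
termination_by (t + 1 - nueva.length).toNat
decreasing_by
  have h1 : 0 < base.length := List.length_pos_iff.mpr h.1
  simp only [List.length_append]
  omega

theorem pvExtendLoopRev_reverse (base : List Int) (t : Int) :
    ∀ (revNueva : List Int) (n : Nat), n = revNueva.length →
      (pvExtendLoopRev base.reverse t revNueva n).reverse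
        = pvExtendLoopNaive base t revNueva.reverse := by
  intro revNueva n
  induction revNueva, n using pvExtendLoopRev.induct (revBase := base.reverse) (t := t) with
  | case1 revNueva n h ih =>
    intro hlen
    subst hlen
    rw [pvExtendLoopRev, dif_pos h,
      ih (by rw [List.length_append, Nat.add_comm])]
    have harg : (base.reverse ++ revNueva).reverse = revNueva.reverse ++ base := by
      rw [List.reverse_append, List.reverse_reverse]
    have hrhs : pvExtendLoopNaive base t revNueva.reverse
        = pvExtendLoopNaive base t (revNueva.reverse ++ base) := by
      conv_lhs => rw [pvExtendLoopNaive]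
      rw [dif_pos (⟨by simpa using h.1, by simpa using h.2⟩ :
        base ≠ [] ∧ t > (revNueva.reverse.length : Int) - 1)]
    rw [harg, hrhs]
  | case2 revNueva n h =>
    intro hlen
    subst hlen
    rw [pvExtendLoopRev, dif_neg h, pvExtendLoopNaive, dif_neg (by simpa using h)]

theorem pvExtendLoop_eq_naive (base : List Int) (t : Int) (nueva : List Int) :
    pvExtendLoop base t nueva = pvExtendLoopNaive base t nueva := by
  rw [pvExtendLoop, pvExtendLoopRev_reverse base t nueva.reverse nueva.length
    (List.length_reverse ..).symm, List.reverse_reverse]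

-- Loop invariant: the accumulated list is a stack of whole copies of `base`,
-- and on exit the target index fits.
theorem pvExtendLoopNaive_inv (base : List Int) (t : Int) (hb : base ≠ []) :
    ∀ nueva : List Int, nueva.length % base.length = 0 →
      (∀ j : Nat, j < nueva.length → nueva[j]? = base[j % base.length]?) →
      base.length ≤ nueva.length →
      (pvExtendLoopNaive base t nueva).length % base.length = 0 ∧
      (∀ j : Nat, j < (pvExtendLoopNaive base t nueva).length →
          (pvExtendLoopNaive base t nueva)[j]? = base[j % base.length]?) ∧
      ¬ t > ((pvExtendLoopNaive base t nueva).length : Int) - 1 ∧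
      base.length ≤ (pvExtendLoopNaive base t nueva).length := by
  intro nueva
  induction nueva using pvExtendLoopNaive.induct (base := base) (t := t) with
  | case1 nueva h ih =>
    intro hmod hget hlen
    rw [pvExtendLoopNaive, dif_pos h]
    apply ih
    · rw [List.length_append, Nat.add_mod, hmod, Nat.mod_self]
      exact Nat.zero_mod _
    · intro j hj
      by_cases hjn : j < nueva.length
      · rw [List.getElem?_append_left hjn]
        exact hget j hjn
      · push_neg at hjn
        rw [List.getElem?_append_right hjn]
        have hd : j - nueva.length < base.length := by
          simp only [List.length_append] at hj; omega
        have hjmod : j % base.length = j - nueva.length := by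
          obtain ⟨q, hq⟩ := Nat.dvd_of_mod_eq_zero hmod
          have hdecomp : j = (j - nueva.length) + base.length * q := by omega
          conv_lhs => rw [hdecomp, Nat.add_mul_mod_self_left]
          exact Nat.mod_eq_of_lt hd
        rw [hjmod]
    · simp only [List.length_append]; omega
  | case2 nueva h =>
    intro hmod hget hlen
    rw [pvExtendLoopNaive, dif_neg h]
    refine ⟨hmod, hget, ?_, hlen⟩
    intro hgt
    exact h ⟨hb, hgt⟩

-- What A's loop-then-index computes: the element at the offset reduced mod len(base).
theorem pvExtendLoop_get (base : List Int) (hb : base ≠ []) (t : Int)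
    (ht : -(base.length : Int) ≤ t) :
    PySem.List.pyGet? (pvExtendLoop base t base) t
      = base[(PySem.Int.mod t (base.length : Int)).toNat]? := by
  rw [pvExtendLoop_eq_naive]
  have hbl : 0 < base.length := List.length_pos_iff.mpr hb
  obtain ⟨hmod, hget, hstop, hlen⟩ :=
    pvExtendLoopNaive_inv base t hb base (Nat.mod_self _)
      (fun j hj => by rw [Nat.mod_eq_of_lt hj]) (le_refl _)
  set r := pvExtendLoopNaive base t base with hr
  obtain ⟨q, hq⟩ := Nat.dvd_of_mod_eq_zero hmod
  by_cases h0 : 0 ≤ t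
  · rw [PySem.List.pyGet?_of_nonneg r h0]
    have htlt : t.toNat < r.length := by omega
    rw [hget _ htlt]
    congr 1
    have hmt : PySem.Int.mod t (base.length : Int) = ((t.toNat % base.length : Nat) : Int) := by
      conv_lhs => rw [← Int.toNat_of_nonneg h0]
      exact PySem.Int.mod_natCast t.toNat base.length
    rw [hmt, Int.toNat_natCast]
  · push_neg at h0
    have hk1 : 0 < (-t).toNat := by omega
    have hk2 : (-t).toNat ≤ base.length := by omega
    have hkr : (-t).toNat ≤ r.length := le_trans hk2 hlen
    have hteq : t = -(((-t).toNat : Nat) : Int) := by omega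
    rw [hteq, PySem.List.pyGet?_neg_natCast r (-t).toNat hk1 hkr]
    have hjr : r.length - (-t).toNat < r.length := by omega
    rw [hget _ hjr]
    congr 1
    have hm : PySem.Int.mod (-(((-t).toNat : Nat) : Int)) (base.length : Int)
        = ((base.length - (-t).toNat : Nat) : Int) := by
      rw [PySem.Int.mod_eq_emod_of_pos (by exact_mod_cast hbl)]
      have hstep := Int.add_mul_emod_self_left
        (a := -(((-t).toNat : Nat) : Int)) (b := (base.length : Int)) (c := 1)
      rw [mul_one] at hstep
      rw [← hstep, Int.emod_eq_of_lt (by omega) (by omega), Int.natCast_sub hk2]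
      ring
    rw [hm]
    have hq1 : q ≠ 0 := by
      rintro rfl
      rw [Nat.mul_zero] at hq
      omega
    obtain ⟨q', rfl⟩ : ∃ q', q = q' + 1 := ⟨q - 1, by omega⟩
    have hmul : base.length * (q' + 1) = base.length * q' + base.length :=
      Nat.mul_succ base.length q'
    have hsplit : r.length - (-t).toNat
        = (base.length - (-t).toNat) + base.length * q' := by omega
    rw [Int.toNat_natCast, hsplit, Nat.add_mul_mod_self_left,
      Nat.mod_eq_of_lt (by omega)]

-- Reflecting a Python floor-mod around len - 1 (used for the reversed branch).
theorem pvModRev (len : Nat) (hl : 0 < len) (t : Int) :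
    PySem.Int.mod ((len : Int) - 1 - t) (len : Int)
      = (len : Int) - 1 - PySem.Int.mod t (len : Int) := by
  have hlz : (0 : Int) < (len : Int) := by exact_mod_cast hl
  rw [PySem.Int.mod_eq_emod_of_pos hlz, PySem.Int.mod_eq_emod_of_pos hlz]
  have h1 : 0 ≤ t % (len : Int) := Int.emod_nonneg t (by omega)
  have h2 : t % (len : Int) < (len : Int) := Int.emod_lt_of_pos t hlz
  have key : ((len : Int) - 1 - t) % (len : Int)
      = ((len : Int) - 1 - t % (len : Int)) % (len : Int) := by
    conv_lhs => rw [show (len : Int) - 1 - t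
      = ((len : Int) - 1 - t % (len : Int)) + (len : Int) * (-(t / (len : Int)))
      from by rw [mul_neg]; have := Int.emod_add_ediv t (len : Int); linarith]
    rw [Int.add_mul_emod_self_left]
  rw [key, Int.emod_eq_of_lt (by omega) (by omega)]

-- ===== VERDICT (by name: the statement is the Claim_ definition above) =====
theorem rotador_indices_spec : Claim_equal_rotador_indices := by
  intro lista i n inv _ hpre
  obtain ⟨hne, hoff⟩ := hpre
  have hbl : 0 < lista.length := List.length_pos_iff.mpr hne
  have hlz : (0 : Int) < (lista.length : Int) := by exact_mod_cast hbl
  unfold Spec_rotador_indices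
  cases inv with
  | false =>
    have hoff' : -(lista.length : Int) ≤ i + n := by simpa using hoff
    simp only [rotador_indices, rotador_indices_alt, reduceIte]
    rw [if_neg (by decide : ¬ (false = true))]
    rw [pvExtendLoop_get lista hne (i + n) hoff']
    rw [PySem.List.pyGet?_of_nonneg lista (PySem.Int.mod_nonneg _ hlz)]
  | true =>
    have hoff' : -(lista.length : Int) ≤ ((lista.length : Int) - 1) - i + n := by
      simpa using hoff
    have hne' : lista.reverse ≠ [] := by simpa using hne
    simp only [rotador_indices, rotador_indices_alt, reduceIte]
    rw [if_neg (by decide : ¬ (true = false))]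
    rw [pvExtendLoop_get lista.reverse hne' _ (by simpa using hoff')]
    rw [PySem.List.pyGet?_of_nonneg lista (PySem.Int.mod_nonneg _ hlz)]
    have h1 : 0 ≤ PySem.Int.mod (i - n) (lista.length : Int) :=
      PySem.Int.mod_nonneg _ hlz
    have h2 : PySem.Int.mod (i - n) (lista.length : Int) < (lista.length : Int) :=
      PySem.Int.mod_lt _ hlz
    have hsc : lista.reverse[(PySem.Int.mod (((lista.length : Int) - 1) - i + n)
          (lista.reverse.length : Int)).toNat]?
        = lista[(PySem.Int.mod (i - n) (lista.length : Int)).toNat]? := by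
      rw [List.length_reverse,
        show ((lista.length : Int) - 1) - i + n = (lista.length : Int) - 1 - (i - n) from by ring,
        pvModRev lista.length hbl (i - n)]
      rw [List.getElem?_reverse (by omega)]
      congr 1
      omega
    rw [hsc]
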